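-- pv_equiv track=rewrite | github.com/8bit-pixies/TreeGrad2 | treegrad/utils_lgb.py | split_trees_by_classes
-- ===== SOURCE A (Python) =====
-- def split_trees_by_classes(trees, n_classes):
--     # https://github.com/BayesWitnesses/m2cgen/blob/master/m2cgen/assemblers/boosting.py
--     # Splits are computed based on a comment
--     # https://github.com/dmlc/xgboost/issues/1746#issuecomment-267400592.
--     if n_classes == 2:
--         return trees
--
--     trees_by_classes = [[] for _ in range(n_classes)]
--     for i in range(len(trees)):
--         class_idx = i % n_classes
--         trees_by_classes[class_idx].append(trees[i])
--     return trees_by_classes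
-- ===== SOURCE B (Python) =====
-- def split_trees_by_classes(trees, n_classes):
--     if n_classes == 2:
--         return trees
--     return [[trees[i] for i in range(c, len(trees), n_classes)]
--             for c in range(n_classes)]
-- ===== Notes on version B (the rewrite author's own statement) =====
-- stated objective: alternative
-- what changed: Replaces the single distribute-by-append pass with mutable buckets by a per-class stride gather: for each class c it collects trees at indices c, c+n_classes, c+2*n_classes, ... directly.
-- outside the precondition, e.g. on split_trees_by_classes([5, 7], 2): A returns [5, 7], B returns [5, 7]
import Mathlib
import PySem

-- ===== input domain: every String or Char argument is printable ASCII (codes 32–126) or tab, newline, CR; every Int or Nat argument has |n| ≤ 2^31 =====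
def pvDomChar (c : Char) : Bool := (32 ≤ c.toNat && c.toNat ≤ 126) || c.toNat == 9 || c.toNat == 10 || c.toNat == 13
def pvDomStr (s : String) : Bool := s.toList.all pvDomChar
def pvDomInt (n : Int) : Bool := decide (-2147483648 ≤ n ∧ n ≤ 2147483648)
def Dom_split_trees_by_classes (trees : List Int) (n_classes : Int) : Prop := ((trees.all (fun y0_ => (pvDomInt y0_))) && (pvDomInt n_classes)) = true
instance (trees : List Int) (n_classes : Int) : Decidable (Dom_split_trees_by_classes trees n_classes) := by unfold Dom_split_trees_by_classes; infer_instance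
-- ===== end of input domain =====

-- B replaces A's single distribute-by-append pass over tree indices with a per-class
-- stride gather (class c collects indices c, c+n, c+2n, ...); alternative decomposition.


-- ===== PORT A =====
-- `if n_classes == 2: return trees` returns the flat input list itself, which is not a
-- value of the declared return type List (List Int); that branch is excluded by Pre_,
-- so the port returns [] there.
def split_trees_by_classes (trees : List Int) (n_classes : Int) : List (List Int) :=
  if n_classes = 2 then []
  else
    (PySem.List.pyRange 0 trees.length 1).foldl
      (fun acc i =>
        let class_idx := PySem.Int.mod i n_classes
        PySem.List.pySetD acc class_idx
          (PySem.List.pyGetD acc class_idx [] ++ [PySem.List.pyGetD trees i 0]))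
      (List.replicate n_classes.toNat [])

-- ===== PORT B =====
-- the n_classes = 2 branch mirrors Source B's `return trees`, excluded by Pre_ (see above)
def split_trees_by_classes_alt (trees : List Int) (n_classes : Int) : List (List Int) :=
  if n_classes = 2 then []
  else
    (PySem.List.pyRange 0 n_classes 1).map
      (fun c => (PySem.List.pyRange c (trees.length : Int) n_classes).map
        (fun i => PySem.List.pyGetD trees i 0))

-- ===== PRECONDITION & SPEC =====
-- Pre_ excludes n_classes = 2, where A returns the flat `trees` list itself (not a value
-- of the declared List (List Int) type), and n_classes ≤ 0 with nonempty trees, where A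
-- raises (ZeroDivisionError for 0, IndexError for negatives).
def Pre_split_trees_by_classes (trees : List Int) (n_classes : Int) : Prop :=
  n_classes ≠ 2 ∧ (1 ≤ n_classes ∨ trees = [])
instance (trees : List Int) (n_classes : Int) : Decidable (Pre_split_trees_by_classes trees n_classes) := by unfold Pre_split_trees_by_classes; infer_instance
def pvWitness_split_trees_by_classes : List Int × Int := ([1, 2, 3, 4, 5], 3)

def Spec_split_trees_by_classes (trees : List Int) (n_classes : Int) (out : List (List Int)) : Prop := out = split_trees_by_classes_alt trees n_classes
instance (trees : List Int) (n_classes : Int) (out : List (List Int)) : Decidable (Spec_split_trees_by_classes trees n_classes out) := by unfold Spec_split_trees_by_classes; infer_instance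

-- ===== CLAIM (what is proved, stated in full; the proofs are below) =====
def Claim_equal_split_trees_by_classes : Prop := ∀ (trees : List Int) (n_classes : Int), Dom_split_trees_by_classes trees n_classes → Pre_split_trees_by_classes trees n_classes → Spec_split_trees_by_classes trees n_classes (split_trees_by_classes trees n_classes)

-- ===== LEMMAS AND PROOFS =====

-- proof-only structural form of B's per-class selection, with running index s
def pvSel (n c : Int) (xs : List Int) (s : Int) : List Int :=
  match xs with
  | [] => []
  | x :: xs => (if PySem.Int.mod s n = c then [x] else []) ++ pvSel n c xs (s + 1)

theorem pvSel_append_singleton (n c : Int) (ys : List Int) (y : Int) (s : Int) :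
    pvSel n c (ys ++ [y]) s
      = pvSel n c ys s ++ (if PySem.Int.mod (s + ys.length) n = c then [y] else []) := by
  induction ys generalizing s with
  | nil => simp [pvSel]
  | cons z zs ih =>
    simp only [List.cons_append, pvSel, ih, List.append_assoc, List.length_cons]
    have : s + 1 + (zs.length : Int) = s + ((zs.length + 1 : Nat) : Int) := by push_cast; ring
    rw [this]
    push_cast
    ring_nf

-- setting index i (0 ≤ i < n) of the mapped class table
theorem pvSet_map_pyRange (n i : Int) (g : Int → List Int) (v : List Int)
    (h0 : 0 ≤ i) (_hn : i < n) :
    PySem.List.pySetD ((PySem.List.pyRange 0 n 1).map g) i v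
      = (PySem.List.pyRange 0 n 1).map (fun c => if c = i then v else g c) := by
  rw [PySem.List.pySetD_of_nonneg _ _ h0]
  apply List.ext_getElem
  · simp
  · intro k h1 h2
    have hlt : k < (PySem.List.pyRange 0 n 1).length := by simpa using h2
    have hk0 : ((PySem.List.pyRange 0 n 1)[k]'hlt) = (k : Int) := by
      rw [PySem.List.getElem_pyRange_one]; ring
    simp only [List.getElem_set, List.getElem_map, hk0]
    by_cases hk : i.toNat = k
    · rw [if_pos hk, if_pos (by omega)]
    · rw [if_neg hk, if_neg (by omega)]

-- the loop invariant: A's fold over the first m indices equals B's table on trees.take m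
theorem pvInvariant (trees : List Int) (n : Int) (hn : 1 ≤ n) (m : Nat)
    (hm : m ≤ trees.length) :
    (PySem.List.pyRange 0 (m : Int) 1).foldl
        (fun acc i =>
          let class_idx := PySem.Int.mod i n
          PySem.List.pySetD acc class_idx
            (PySem.List.pyGetD acc class_idx [] ++ [PySem.List.pyGetD trees i 0]))
        (List.replicate n.toNat [])
      = (PySem.List.pyRange 0 n 1).map (fun c => pvSel n c (trees.take m) 0) := by
  induction m with
  | zero =>
    rw [show ((0 : Nat) : Int) = 0 by norm_num, PySem.List.pyRange_one_eq_nil (le_refl 0),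
        List.foldl_nil]
    apply List.ext_getElem
    · simp [PySem.List.length_pyRange_one]
    · intro k h1 h2
      simp [pvSel]
  | succ m ih =>
    have hm' : m ≤ trees.length := by omega
    have hmlt : m < trees.length := by omega
    have hcast : ((m + 1 : Nat) : Int) = (m : Int) + 1 := by push_cast; ring
    rw [hcast, PySem.List.pyRange_one_succ_right (by omega), List.foldl_append, ih hm']
    simp only [List.foldl_cons, List.foldl_nil]
    have hmod0 : 0 ≤ PySem.Int.mod (m : Int) n := PySem.Int.mod_nonneg _ (by omega)
    have hmodn : PySem.Int.mod (m : Int) n < n := PySem.Int.mod_lt _ (by omega)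
    rw [PySem.List.pyGetD_map_pyRange_of_nonneg _ n _ _ hmod0 hmodn,
        pvSet_map_pyRange n _ _ _ hmod0 hmodn]
    apply List.map_congr_left
    intro c hc
    rw [PySem.List.mem_pyRange_one] at hc
    have htake : trees.take (m + 1) = trees.take m ++ [trees[m]] := by
      rw [List.take_add_one]
      simp [List.getElem?_eq_getElem hmlt]
    rw [htake, pvSel_append_singleton]
    have hlen : (List.take m trees).length = m := by simp [hm']
    rw [hlen]
    have hget : PySem.List.pyGetD trees (m : Int) 0 = trees[m] := by
      simp [PySem.List.pyGetD_natCast, List.getD_eq_getElem?_getD,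
            List.getElem?_eq_getElem hmlt]
    by_cases hce : c = PySem.Int.mod (m : Int) n
    · simp [hce, hget, zero_add]
    · rw [if_neg hce, if_neg (by rw [zero_add]; exact fun h => hce h.symm)]
      simp

-- for 0 <= c < n, the Python test i % n == c picks exactly the stride indices
theorem pvMod_eq_iff_dvd (n c L : Int) (hn : 0 < n) (hc0 : 0 ≤ c) (hcn : c < n) :
    PySem.Int.mod L n = c ↔ n ∣ (L - c) := by
  rw [PySem.Int.mod_eq_emod_of_pos hn]
  constructor
  · intro h
    exact ⟨L / n, by have := Int.mul_ediv_add_emod L n; omega⟩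
  · rintro ⟨q, hq⟩
    have hLc : L = c + n * q := by omega
    rw [hLc, Int.add_mul_emod_self_left, Int.emod_eq_of_lt hc0 hcn]

-- a positive-step range grows on the right exactly at the stride indices
theorem pvRange_succ_right (c n L : Int) (hn : 0 < n) :
    PySem.List.pyRange c (L + 1) n
      = PySem.List.pyRange c L n ++ (if c ≤ L ∧ n ∣ (L - c) then [L] else []) := by
  have hn0 : n ≠ 0 := by omega
  rw [PySem.List.pyRange_of_pos _ _ hn, PySem.List.pyRange_of_pos _ _ hn]
  rcases Int.lt_or_le L c with hLc | hcle
  · rw [if_neg (show ¬ c < L + 1 by omega), if_neg (show ¬ c < L by omega),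
        if_neg (show ¬ (c ≤ L ∧ n ∣ (L - c)) from fun h => by omega)]
    simp
  · rw [if_pos (show c < L + 1 by omega)]
    by_cases hdvd : n ∣ (L - c)
    · obtain ⟨q, hq⟩ := hdvd
      have hq0 : 0 ≤ q := by
        by_contra hq1
        have : n * q < 0 := mul_neg_of_pos_of_neg hn (by omega)
        omega
      have hnum1 : L + 1 - c + n - 1 = (q + 1) * n := by
        rw [add_one_mul, mul_comm q n]; omega
      have h1 : (L + 1 - c + n - 1) / n = q + 1 := by
        rw [hnum1, Int.mul_ediv_cancel _ hn0]
      rw [h1, if_pos (show c ≤ L ∧ n ∣ (L - c) from ⟨hcle, ⟨q, hq⟩⟩)]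
      rcases eq_or_lt_of_le hcle with hceq | hclt
      · have hq' : q = 0 := by
          have h0 : n * q = 0 := by omega
          rcases mul_eq_zero.mp h0 with h | h
          · omega
          · exact h
        rw [if_neg (show ¬ c < L by omega), hq']
        norm_num
        omega
      · have hq1 : 1 ≤ q := by
          by_contra hq1
          have : q = 0 := by omega
          rw [this, mul_zero] at hq
          omega
        have hnum0 : L - c + n - 1 = (n - 1) + q * n := by
          rw [mul_comm q n]; omega
        have h0 : (L - c + n - 1) / n = q := by
          rw [hnum0, Int.add_mul_ediv_right _ _ hn0,
              Int.ediv_eq_zero_of_lt (by omega) (by omega), zero_add]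
        rw [if_pos hclt, h0]
        have htq : (q + 1).toNat = q.toNat + 1 := by omega
        rw [htq, List.range_succ, List.map_append]
        congr 1
        simp only [List.map_cons, List.map_nil]
        congr 2
        have hqq : (q.toNat : Int) = q := by omega
        rw [hqq]; omega
    · have hne : (L - c) % n ≠ 0 := fun h => hdvd (Int.dvd_of_emod_eq_zero h)
      have hq := Int.mul_ediv_add_emod (L - c) n
      have hr0 : 0 ≤ (L - c) % n := Int.emod_nonneg _ hn0
      have hrn : (L - c) % n < n := Int.emod_lt_of_pos _ hn
      have hclt : c < L := by
        rcases eq_or_lt_of_le hcle with h | h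
        · exfalso; apply hne; rw [← h]; simp
        · exact h
      have hnum1 : L + 1 - c + n - 1 = (L - c) % n + ((L - c) / n + 1) * n := by
        rw [add_one_mul, mul_comm ((L - c) / n) n]; omega
      have hnum0 : L - c + n - 1 = ((L - c) % n - 1) + ((L - c) / n + 1) * n := by
        rw [add_one_mul, mul_comm ((L - c) / n) n]; omega
      have h1 : (L + 1 - c + n - 1) / n = (L - c) / n + 1 := by
        rw [hnum1, Int.add_mul_ediv_right _ _ hn0,
            Int.ediv_eq_zero_of_lt hr0 hrn, zero_add]
      have h0 : (L - c + n - 1) / n = (L - c) / n + 1 := by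
        rw [hnum0, Int.add_mul_ediv_right _ _ hn0,
            Int.ediv_eq_zero_of_lt (by omega) (by omega), zero_add]
      rw [h1, if_pos hclt, h0, if_neg (fun h => hdvd h.2)]
      simp

-- B's per-class stride gather computes pvSel
theorem pvStride (n c : Int) (hn : 0 < n) (hc0 : 0 ≤ c) (hcn : c < n) (xs : List Int) :
    (PySem.List.pyRange c (xs.length : Int) n).map (fun i => PySem.List.pyGetD xs i 0)
      = pvSel n c xs 0 := by
  induction xs using List.reverseRecOn with
  | nil =>
    simp only [List.length_nil, Nat.cast_zero]
    rw [PySem.List.pyRange_of_pos _ _ hn, if_neg (by omega : ¬ c < 0)]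
    simp [pvSel]
  | append_singleton xs y ih =>
    have hL : ((xs ++ [y]).length : Int) = (xs.length : Int) + 1 := by
      simp
    rw [hL, pvRange_succ_right c n _ hn, List.map_append,
        pvSel_append_singleton, ← ih]
    congr 1
    · apply List.map_congr_left
      intro i hi
      rw [PySem.List.mem_pyRange_iff_of_pos hn] at hi
      obtain ⟨hic, hiL, -⟩ := hi
      have h0i : 0 ≤ i := le_trans hc0 hic
      rw [PySem.List.pyGetD_eq_getElem _ _ h0i (by simp; omega),
          PySem.List.pyGetD_eq_getElem _ _ h0i (by omega)]
      exact List.getElem_append_left (by omega)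
    · rw [zero_add]
      by_cases hc : PySem.Int.mod (xs.length : Int) n = c
      · have hdvd : n ∣ ((xs.length : Int) - c) := (pvMod_eq_iff_dvd n c _ hn hc0 hcn).mp hc
        have hcl : c ≤ (xs.length : Int) := by
          have h1 := Int.mul_ediv_add_emod (xs.length : Int) n
          have h2 : 0 ≤ (xs.length : Int) / n := Int.ediv_nonneg (by positivity) (by omega)
          have h3 : 0 ≤ n * ((xs.length : Int) / n) := mul_nonneg (by omega) h2
          rw [PySem.Int.mod_eq_emod_of_pos hn] at hc
          omega
        rw [if_pos ⟨hcl, hdvd⟩, if_pos hc]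
        simp only [List.map_cons, List.map_nil]
        congr 1
        rw [PySem.List.pyGetD_eq_getElem _ _ (by positivity) (by simp)]
        simp
      · rw [if_neg hc, if_neg
          (fun h => hc ((pvMod_eq_iff_dvd n c _ hn hc0 hcn).mpr h.2))]
        simp

-- ===== VERDICT (by name: the statement is the Claim_ definition above) =====
theorem split_trees_by_classes_spec : Claim_equal_split_trees_by_classes := by
  intro trees n _ hpre
  obtain ⟨hne2, hcase⟩ := hpre
  unfold Spec_split_trees_by_classes split_trees_by_classes split_trees_by_classes_alt
  rw [if_neg hne2, if_neg hne2]
  rcases Int.lt_or_le n 1 with hn | hn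
  swap
  · rw [pvInvariant trees n hn trees.length le_rfl]
    simp only [List.take_length]
    apply List.map_congr_left
    intro c hc
    rw [PySem.List.mem_pyRange_one] at hc
    exact (pvStride n c (by omega) hc.1 hc.2 trees).symm
  · have hnil : trees = [] := by
      rcases hcase with h | h
      · omega
      · exact h
    subst hnil
    rw [PySem.List.pyRange_one_eq_nil (by omega : n ≤ (0 : Int))]
    simp only [List.length_nil, Nat.cast_zero, List.map_nil]
    rw [PySem.List.pyRange_one_eq_nil (le_refl (0 : Int)), List.foldl_nil,
        show n.toNat = 0 by omega]
    simp
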